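-- pv_equiv track=rewrite | github.com/potatoprograms/tally-ho | tallyho.py | alphabet_count
-- ===== SOURCE A (Python) =====
-- def apply_offsets(char, count, offsets):
--     if char in offsets:
--         count += offsets[char]
--     elif "OTHERWISE" in offsets:
--         count += offsets["OTHERWISE"]
--     if "ALL" in offsets:
--         count += offsets["ALL"]
--     if "LETTER" in offsets and char.isalpha():
--         count += offsets["LETTER"]
--     elif "NUMBER" in offsets and char.isdigit():
--         count += offsets["NUMBER"]
--     elif "SYMBOL" in offsets and not char.isalpha() and not char.isdigit():
--         count += offsets["SYMBOL"]
--
--     return count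
--
-- def alphabet_count(s, offsets, grouping=False):
--     cnt = 0
--     s = s.lower()
--     i = 0
--
--     while i < len(s):
--         char = s[i]
--
--         if 'a' <= char <= 'z':
--             cnt += ord(char) - ord('a') + 1
--
--             cnt = apply_offsets(char, cnt, offsets)
--
--             i += 1
--
--         elif char.isdigit():
--             if grouping:
--                 start = i
--                 while i < len(s) and s[i].isdigit():
--                     i += 1
--
--                 number_value = int(s[start:i])
--                 cnt += number_value
--                 cnt = apply_offsets(str(number_value), cnt, offsets)
--
--             else:
--                 cnt += int(char)
--
--                 cnt = apply_offsets(char, cnt, offsets)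
--
--                 i += 1
--
--         else:
--             cnt = apply_offsets(char, cnt, offsets)
--
--             i += 1
--
--     return cnt
-- ===== SOURCE B (Python) =====
-- def apply_offsets(char, count, offsets):
--     if char in offsets:
--         count += offsets[char]
--     elif "OTHERWISE" in offsets:
--         count += offsets["OTHERWISE"]
--     if "ALL" in offsets:
--         count += offsets["ALL"]
--     if "LETTER" in offsets and char.isalpha():
--         count += offsets["LETTER"]
--     elif "NUMBER" in offsets and char.isdigit():
--         count += offsets["NUMBER"]
--     elif "SYMBOL" in offsets and not char.isalpha() and not char.isdigit():
--         count += offsets["SYMBOL"]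
--
--     return count
--
--
-- def _delta(key, offsets):
--     # the contribution of apply_offsets is independent of the running count
--     return apply_offsets(key, 0, offsets)
--
--
-- def _contrib(ch, offsets):
--     if ch.isdigit():
--         base = int(ch)
--     elif 'a' <= ch <= 'z':
--         base = ord(ch) - ord('a') + 1
--     else:
--         base = 0
--     return base + _delta(ch, offsets)
--
--
-- def _flush(buf, offsets):
--     if not buf:
--         return 0
--     n = int(''.join(buf))
--     return n + _delta(str(n), offsets)
--
--
-- def alphabet_count(s, offsets, grouping=False):
--     s = s.lower()
--     if not grouping:
--         return sum(_contrib(ch, offsets) for ch in s)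
--     total = 0
--     buf = []
--     for ch in s:
--         if ch.isdigit():
--             buf.append(ch)
--         else:
--             total += _flush(buf, offsets) + _contrib(ch, offsets)
--             buf = []
--     return total + _flush(buf, offsets)
-- ===== Notes on version B (the rewrite author's own statement) =====
-- stated objective: simpler
-- what changed: A's index-driven while loop with an inner digit-run scan and a threaded count is replaced by a sum of independent per-character contributions (non-grouping) and a single left-to-right fold carrying a pending digit buffer that is flushed at each non-digit and at the end (grouping), exploiting that apply_offsets adds a count-independent delta.
import Mathlib
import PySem

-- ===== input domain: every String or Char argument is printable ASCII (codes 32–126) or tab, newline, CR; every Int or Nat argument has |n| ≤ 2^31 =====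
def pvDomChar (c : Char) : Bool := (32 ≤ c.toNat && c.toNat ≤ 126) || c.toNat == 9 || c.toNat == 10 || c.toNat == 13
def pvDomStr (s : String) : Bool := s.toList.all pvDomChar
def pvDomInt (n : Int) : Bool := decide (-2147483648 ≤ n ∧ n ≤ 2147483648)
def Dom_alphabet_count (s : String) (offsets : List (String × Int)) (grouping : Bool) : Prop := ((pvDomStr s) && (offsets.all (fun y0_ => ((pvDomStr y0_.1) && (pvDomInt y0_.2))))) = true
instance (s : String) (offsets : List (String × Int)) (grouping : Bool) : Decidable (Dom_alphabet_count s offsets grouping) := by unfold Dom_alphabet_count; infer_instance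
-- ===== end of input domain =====

-- B replaces A's index-driven while loop by a sum of independent per-character
-- contributions (non-grouping) / a single fold with a pending digit buffer
-- (grouping), reusing apply_offsets with count 0; objective: simpler/idiomatic.

-- ===== PORT A =====
-- shared helper: Python apply_offsets (used verbatim by both A and B);
-- its three statement blocks are the three steps below
def offStep1 (ch : String) (count : Int) (d : PySem.Dict String Int) : Int :=
  if (d.get? ch).isSome then count + d.getD ch 0
  else if (d.get? "OTHERWISE").isSome then count + d.getD "OTHERWISE" 0
  else count

def offStep2 (count : Int) (d : PySem.Dict String Int) : Int :=
  if (d.get? "ALL").isSome then count + d.getD "ALL" 0 else count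

def offStep3 (ch : String) (count : Int) (d : PySem.Dict String Int) : Int :=
  if (d.get? "LETTER").isSome && PySem.Str.strIsalpha ch then count + d.getD "LETTER" 0
  else if (d.get? "NUMBER").isSome && PySem.Str.strIsdigit ch then count + d.getD "NUMBER" 0
  else if (d.get? "SYMBOL").isSome && !PySem.Str.strIsalpha ch && !PySem.Str.strIsdigit ch then
    count + d.getD "SYMBOL" 0
  else count

def applyOffsets (ch : String) (count : Int) (offsets : List (String × Int)) : Int :=
  offStep3 ch (offStep2 (offStep1 ch count (PySem.Dict.mk offsets)) (PySem.Dict.mk offsets))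
    (PySem.Dict.mk offsets)

-- A's while loop: the index i only moves forward, so it is the structural
-- recursion over the suffix of the (lowered) character list.
def loopA (offsets : List (String × Int)) (grouping : Bool) : List Char → Int → Int
  | [], cnt => cnt
  | c :: rest, cnt =>
    if 'a' ≤ c ∧ c ≤ 'z' then
      loopA offsets grouping rest
        (applyOffsets (String.ofList [c]) (cnt + ((c.toNat : Int) - 96)) offsets)
    else if PySem.Chars.isdigit c then
      if grouping then
        -- inner while collecting s[start:i] = the maximal digit run; number_value = int(run)
        loopA offsets grouping ((c :: rest).dropWhile PySem.Chars.isdigit)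
          (applyOffsets
            (PySem.Int.toStr ((PySem.Int.ofChars? ((c :: rest).takeWhile PySem.Chars.isdigit)).getD 0))
            (cnt + (PySem.Int.ofChars? ((c :: rest).takeWhile PySem.Chars.isdigit)).getD 0)
            offsets)
      else
        loopA offsets grouping rest
          (applyOffsets (String.ofList [c]) (cnt + (PySem.Int.ofChars? [c]).getD 0) offsets)
    else
      loopA offsets grouping rest (applyOffsets (String.ofList [c]) cnt offsets)
termination_by cs _ => cs.length
decreasing_by
  · simp
  · rename_i _ h2
    rw [List.dropWhile_cons_of_pos h2]
    have := List.length_dropWhile_le PySem.Chars.isdigit rest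
    simp; omega
  · simp
  · simp

def alphabet_count (s : String) (offsets : List (String × Int)) (grouping : Bool) : Int :=
  loopA offsets grouping (PySem.Chars.lower s.toList) 0

-- ===== PORT B =====
def deltaB (key : String) (offsets : List (String × Int)) : Int :=
  applyOffsets key 0 offsets

def contribB (c : Char) (offsets : List (String × Int)) : Int :=
  (if PySem.Chars.isdigit c then (PySem.Int.ofChars? [c]).getD 0
   else if 'a' ≤ c ∧ c ≤ 'z' then ((c.toNat : Int) - 96)
   else 0) + deltaB (String.ofList [c]) offsets

def flushB (buf : List Char) (offsets : List (String × Int)) : Int :=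
  if buf = [] then 0
  else (PySem.Int.ofChars? buf).getD 0
       + deltaB (PySem.Int.toStr ((PySem.Int.ofChars? buf).getD 0)) offsets

def loopB (offsets : List (String × Int)) : List Char → Int → List Char → Int
  | [], total, buf => total + flushB buf offsets
  | c :: rest, total, buf =>
    if PySem.Chars.isdigit c then loopB offsets rest total (buf ++ [c])
    else loopB offsets rest (total + flushB buf offsets + contribB c offsets) []

def alphabet_count_alt (s : String) (offsets : List (String × Int)) (grouping : Bool) : Int :=
  let cs := PySem.Chars.lower s.toList
  if grouping then loopB offsets cs 0 []
  else (cs.map (fun c => contribB c offsets)).sum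

-- ===== PRECONDITION & SPEC =====
def Spec_alphabet_count (s : String) (offsets : List (String × Int)) (grouping : Bool) (out : Int) : Prop := out = alphabet_count_alt s offsets grouping
instance (s : String) (offsets : List (String × Int)) (grouping : Bool) (out : Int) : Decidable (Spec_alphabet_count s offsets grouping out) := by unfold Spec_alphabet_count; infer_instance

-- ===== CLAIM (what is proved, stated in full; the proofs are below) =====
def Claim_equal_alphabet_count : Prop := ∀ (s : String) (offsets : List (String × Int)) (grouping : Bool), Dom_alphabet_count s offsets grouping → Spec_alphabet_count s offsets grouping (alphabet_count s offsets grouping)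

-- ===== LEMMAS AND PROOFS =====

lemma offStep1_shift (ch : String) (x y : Int) (d : PySem.Dict String Int) :
    offStep1 ch (x + y) d = x + offStep1 ch y d := by
  unfold offStep1; split_ifs <;> omega

lemma offStep2_shift (x y : Int) (d : PySem.Dict String Int) :
    offStep2 (x + y) d = x + offStep2 y d := by
  unfold offStep2; split_ifs <;> omega

lemma offStep3_shift (ch : String) (x y : Int) (d : PySem.Dict String Int) :
    offStep3 ch (x + y) d = x + offStep3 ch y d := by
  unfold offStep3; split_ifs <;> omega

-- apply_offsets adds a count-independent delta
lemma applyOffsets_add (ch : String) (cnt : Int) (offsets : List (String × Int)) :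
    applyOffsets ch cnt offsets = cnt + applyOffsets ch 0 offsets := by
  unfold applyOffsets
  have h : cnt = cnt + 0 := by omega
  rw [h, offStep1_shift, offStep2_shift, offStep3_shift]
  omega

lemma letter_not_digit (c : Char) (h : 'a' ≤ c) : PySem.Chars.isdigit c = false := by
  simp only [PySem.Chars.isdigit, Bool.and_eq_false_iff, decide_eq_false_iff_not, Char.not_le]
  right
  exact lt_of_lt_of_le (by decide) h

-- non-grouping: A's loop is the sum of per-character contributions
lemma loopA_false (offsets : List (String × Int)) :
    ∀ (cs : List Char) (cnt : Int),
      loopA offsets false cs cnt = cnt + (cs.map (fun c => contribB c offsets)).sum := by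
  intro cs
  induction cs with
  | nil => intro cnt; simp [loopA]
  | cons c rest ih =>
    intro cnt
    by_cases hl : 'a' ≤ c ∧ c ≤ 'z'
    · rw [loopA, if_pos hl, ih, applyOffsets_add]
      simp [contribB, deltaB, letter_not_digit c hl.1, hl]
      ring
    · by_cases hd : PySem.Chars.isdigit c
      · rw [loopA, if_neg hl, if_pos hd]
        simp only [Bool.false_eq_true, if_false]
        rw [ih, applyOffsets_add]
        simp [contribB, deltaB, hd]
        ring
      · rw [loopA, if_neg hl, if_neg hd, ih, applyOffsets_add]
        simp [contribB, deltaB, hd, hl]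
        ring

-- pushing a run of digits through B's loop just extends the pending buffer
lemma loopB_digits (offsets : List (String × Int)) :
    ∀ (run : List Char), (∀ c ∈ run, PySem.Chars.isdigit c = true) →
      ∀ (chars : List Char) (total : Int) (buf : List Char),
        loopB offsets (run ++ chars) total buf = loopB offsets chars total (buf ++ run) := by
  intro run
  induction run with
  | nil => intro _ chars total buf; simp
  | cons c rest ih =>
    intro h chars total buf
    have hc : PySem.Chars.isdigit c = true := h c (by simp)
    rw [List.cons_append, loopB, if_pos hc, ih (fun x hx => h x (by simp [hx]))]
    simp

-- flushing the pending buffer early is harmless when the next char is not a digit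
lemma loopB_flush (offsets : List (String × Int)) (chars : List Char) (total : Int)
    (buf : List Char)
    (h : chars = [] ∨ ∃ d dd, chars = d :: dd ∧ PySem.Chars.isdigit d = false) :
    loopB offsets chars (total + flushB buf offsets) [] = loopB offsets chars total buf := by
  rcases h with h | ⟨d, dd, rfl, hd⟩
  · subst h; simp [loopB, flushB]
  · rw [loopB, if_neg (by simp [hd]), loopB, if_neg (by simp [hd])]
    have : total + flushB buf offsets + flushB [] offsets + contribB d offsets
         = total + flushB buf offsets + contribB d offsets := by simp [flushB]
    rw [this]

-- grouping: A's loop equals B's buffered fold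
lemma loopA_true (offsets : List (String × Int)) :
    ∀ (fuel : Nat) (cs : List Char), cs.length ≤ fuel →
      ∀ (cnt : Int), loopA offsets true cs cnt = loopB offsets cs cnt [] := by
  intro fuel
  induction fuel with
  | zero =>
    intro cs h cnt
    have : cs = [] := List.length_eq_zero_iff.mp (Nat.le_zero.mp h)
    subst this; simp [loopA, loopB, flushB]
  | succ n ih =>
    intro cs h cnt
    cases cs with
    | nil => simp [loopA, loopB, flushB]
    | cons c rest =>
      by_cases hl : 'a' ≤ c ∧ c ≤ 'z'
      · have hd : PySem.Chars.isdigit c = false := letter_not_digit c hl.1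
        rw [loopA, if_pos hl, ih rest (by simpa using h), loopB, if_neg (by simp [hd]),
            applyOffsets_add]
        congr 1
        simp [contribB, deltaB, flushB, hd, hl]
        ring
      · by_cases hd : PySem.Chars.isdigit c
        · rw [loopA, if_neg hl, if_pos hd]
          simp only [if_true]
          have hsplit : (c :: rest).takeWhile PySem.Chars.isdigit
              ++ (c :: rest).dropWhile PySem.Chars.isdigit = c :: rest :=
            List.takeWhile_append_dropWhile
          have htwd : ∀ x ∈ (c :: rest).takeWhile PySem.Chars.isdigit,
              PySem.Chars.isdigit x = true := fun x hx => List.mem_takeWhile_imp hx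
          have htwne : (c :: rest).takeWhile PySem.Chars.isdigit ≠ [] := by
            rw [List.takeWhile_cons_of_pos hd]; simp
          have hdwlen : ((c :: rest).dropWhile PySem.Chars.isdigit).length ≤ n := by
            rw [List.dropWhile_cons_of_pos hd]
            have := List.length_dropWhile_le PySem.Chars.isdigit rest
            simp at h; omega
          have hdwshape : (c :: rest).dropWhile PySem.Chars.isdigit = []
              ∨ ∃ d dd, (c :: rest).dropWhile PySem.Chars.isdigit = d :: dd
                  ∧ PySem.Chars.isdigit d = false := by
            cases hdw : (c :: rest).dropWhile PySem.Chars.isdigit with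
            | nil => exact Or.inl rfl
            | cons d dd =>
              refine Or.inr ⟨d, dd, rfl, ?_⟩
              have hne : (c :: rest).dropWhile PySem.Chars.isdigit ≠ [] := by
                rw [hdw]; simp
              have h1 := List.head_dropWhile_not PySem.Chars.isdigit hne
              simpa [hdw] using h1
          rw [ih _ hdwlen, applyOffsets_add]
          have hflush : flushB ((c :: rest).takeWhile PySem.Chars.isdigit) offsets
              = (PySem.Int.ofChars? ((c :: rest).takeWhile PySem.Chars.isdigit)).getD 0
                + deltaB (PySem.Int.toStr
                    ((PySem.Int.ofChars? ((c :: rest).takeWhile PySem.Chars.isdigit)).getD 0))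
                    offsets := by
            rw [flushB, if_neg htwne]
          calc loopB offsets ((c :: rest).dropWhile PySem.Chars.isdigit)
                (cnt + (PySem.Int.ofChars? ((c :: rest).takeWhile PySem.Chars.isdigit)).getD 0
                     + deltaB (PySem.Int.toStr
                         ((PySem.Int.ofChars? ((c :: rest).takeWhile PySem.Chars.isdigit)).getD 0))
                         offsets) []
              = loopB offsets ((c :: rest).dropWhile PySem.Chars.isdigit)
                  (cnt + flushB ((c :: rest).takeWhile PySem.Chars.isdigit) offsets) [] := by
                rw [hflush]; ring_nf
            _ = loopB offsets ((c :: rest).dropWhile PySem.Chars.isdigit) cnt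
                  ((c :: rest).takeWhile PySem.Chars.isdigit) :=
                loopB_flush offsets _ cnt _ hdwshape
            _ = loopB offsets ((c :: rest).takeWhile PySem.Chars.isdigit
                  ++ (c :: rest).dropWhile PySem.Chars.isdigit) cnt [] := by
                rw [loopB_digits offsets _ htwd]; simp
            _ = loopB offsets (c :: rest) cnt [] := by rw [hsplit]
        · rw [loopA, if_neg hl, if_neg hd, ih rest (by simpa using h), loopB,
              if_neg (by simp [hd]), applyOffsets_add]
          congr 1
          simp [contribB, deltaB, flushB, hd, hl]

-- ===== VERDICT (by name: the statement is the Claim_ definition above) =====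
theorem alphabet_count_spec : Claim_equal_alphabet_count := by
  intro s offsets grouping _
  unfold Spec_alphabet_count alphabet_count alphabet_count_alt
  cases grouping with
  | false => simp [loopA_false]
  | true => simp [loopA_true offsets (PySem.Chars.lower s.toList).length _ le_rfl]
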